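-- pv_equiv track=rewrite | github.com/nwclasantha/SOC-Defense-System | modules/MitreAttackMapper.py | _get_kill_chain_phase_from_names
-- ===== SOURCE A (Python) =====
-- def _get_kill_chain_phase_from_names(tactics) -> str:
--     """Determine kill chain phase from tactics (handles both strings and enums)"""
--     # Normalize to lowercase strings
--     tactic_names = set()
--     for t in tactics:
--         if isinstance(t, str):
--             tactic_names.add(t.lower().replace(' ', '-'))
--         elif hasattr(t, 'name'):
--             tactic_names.add(t.name.lower().replace('_', '-'))
--
--     if 'reconnaissance' in tactic_names:
--         return "Reconnaissance"
--     elif 'initial-access' in tactic_names: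
--         return "Initial Access / Weaponization"
--     elif 'execution' in tactic_names:
--         return "Delivery / Exploitation"
--     elif 'persistence' in tactic_names or 'privilege-escalation' in tactic_names:
--         return "Installation"
--     elif 'command-and-control' in tactic_names:
--         return "Command & Control"
--     elif 'exfiltration' in tactic_names or 'impact' in tactic_names:
--         return "Actions on Objectives"
--     else:
--         return "Unknown"
-- ===== SOURCE B (Python) =====
-- _RANK = {
--     'reconnaissance': 0,
--     'initial-access': 1,
--     'execution': 2,
--     'persistence': 3,
--     'privilege-escalation': 3,
--     'command-and-control': 4,
--     'exfiltration': 5,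
--     'impact': 5,
-- }
--
-- _PHASES = [
--     "Reconnaissance",
--     "Initial Access / Weaponization",
--     "Delivery / Exploitation",
--     "Installation",
--     "Command & Control",
--     "Actions on Objectives",
-- ]
--
--
-- def _get_kill_chain_phase_from_names(tactics) -> str:
--     # Single pass: keep the minimum priority rank seen; index the phase table.
--     best = 6
--     for t in tactics:
--         if isinstance(t, str):
--             n = t.lower().replace(' ', '-')
--         elif hasattr(t, 'name'):
--             n = t.name.lower().replace('_', '-')
--         else:
--             continue
--         r = _RANK.get(n, 6)
--         if r < best:
--             best = r
--     return _PHASES[best] if best < 6 else "Unknown"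
-- ===== Notes on version B (the rewrite author's own statement) =====
-- stated objective: alternative
-- what changed: Instead of building a set of names and walking a six-branch if/elif membership chain, B makes a single pass keeping only the minimum numeric priority rank (via a name->rank dict) and at the end indexes a phase table with that rank.
import Mathlib
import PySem

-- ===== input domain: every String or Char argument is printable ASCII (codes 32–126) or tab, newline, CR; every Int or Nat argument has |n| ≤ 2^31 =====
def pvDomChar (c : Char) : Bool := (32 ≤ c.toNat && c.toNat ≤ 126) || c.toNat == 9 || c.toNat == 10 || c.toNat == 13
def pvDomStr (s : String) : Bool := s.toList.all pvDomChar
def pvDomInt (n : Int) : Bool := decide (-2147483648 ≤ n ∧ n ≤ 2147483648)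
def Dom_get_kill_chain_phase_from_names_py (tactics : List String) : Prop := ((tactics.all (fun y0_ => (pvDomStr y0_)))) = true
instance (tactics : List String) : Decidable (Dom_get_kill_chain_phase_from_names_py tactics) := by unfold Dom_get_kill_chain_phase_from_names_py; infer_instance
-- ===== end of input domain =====

-- B replaces A's set-build + six-branch membership chain with one pass keeping the minimum priority rank and a final phase-table index (alternative decomposition; same cost).


-- ===== PORT A =====
-- t.lower().replace(' ', '-')  (inputs are List String, so only the isinstance-str branch fires)
def pvNorm (t : String) : String := PySem.Str.replace (PySem.Str.lower t) " " "-"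

def get_kill_chain_phase_from_names_py (tactics : List String) : String :=
  let tactic_names : PySem.Set String :=
    tactics.foldl (fun s t => PySem.Set.add s (pvNorm t)) PySem.Set.empty
  if PySem.Set.contains tactic_names "reconnaissance" then "Reconnaissance"
  else if PySem.Set.contains tactic_names "initial-access" then "Initial Access / Weaponization"
  else if PySem.Set.contains tactic_names "execution" then "Delivery / Exploitation"
  else if PySem.Set.contains tactic_names "persistence" || PySem.Set.contains tactic_names "privilege-escalation" then "Installation"
  else if PySem.Set.contains tactic_names "command-and-control" then "Command & Control"
  else if PySem.Set.contains tactic_names "exfiltration" || PySem.Set.contains tactic_names "impact" then "Actions on Objectives"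
  else "Unknown"

-- ===== PORT B =====
def pvRankDict : PySem.Dict String Nat :=
  PySem.Dict.ofList
    [ ("reconnaissance", 0), ("initial-access", 1), ("execution", 2),
      ("persistence", 3), ("privilege-escalation", 3), ("command-and-control", 4),
      ("exfiltration", 5), ("impact", 5) ]

def pvPhases : List String :=
  [ "Reconnaissance", "Initial Access / Weaponization", "Delivery / Exploitation",
    "Installation", "Command & Control", "Actions on Objectives" ]

def get_kill_chain_phase_from_names_py_alt (tactics : List String) : String :=
  let best : Nat :=
    tactics.foldl (fun best t =>
      let r := PySem.Dict.getD pvRankDict (pvNorm t) 6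
      if r < best then r else best) 6
  if best < 6 then pvPhases.getD best "Unknown" else "Unknown"

-- ===== PRECONDITION & SPEC =====
def Spec_get_kill_chain_phase_from_names_py (tactics : List String) (out : String) : Prop := out = get_kill_chain_phase_from_names_py_alt tactics
instance (tactics : List String) (out : String) : Decidable (Spec_get_kill_chain_phase_from_names_py tactics out) := by unfold Spec_get_kill_chain_phase_from_names_py; infer_instance

-- ===== CLAIM =====
def Claim_equal_get_kill_chain_phase_from_names_py : Prop := ∀ (tactics : List String), Dom_get_kill_chain_phase_from_names_py tactics → Spec_get_kill_chain_phase_from_names_py tactics (get_kill_chain_phase_from_names_py tactics)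

-- ===== LEMMAS AND PROOFS =====
-- shorthand for the rank of a (normalized) name
def pvRk (n : String) : Nat := PySem.Dict.getD pvRankDict n 6

theorem pvContains_fold (tactics : List String) (x : String) :
    PySem.Set.contains
      (tactics.foldl (fun s t => PySem.Set.add s (pvNorm t)) PySem.Set.empty) x
      = decide (x ∈ tactics.map pvNorm) := by
  simp [PySem.Set.contains_eq_listContains, PySem.Set.mem_foldl_add, PySem.Set.empty, eq_comm]

theorem pvFoldl_min_le (l : List String) (a k : Nat) :
    (l.foldl (fun best t =>
        let r := pvRk (pvNorm t)
        if r < best then r else best) a ≤ k)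
      ↔ a ≤ k ∨ ∃ t ∈ l, pvRk (pvNorm t) ≤ k := by
  induction l generalizing a with
  | nil => simp
  | cons x xs ih =>
    simp only [List.foldl_cons, ih, List.mem_cons]
    constructor
    · rintro (h | h)
      · split_ifs at h with hr
        · exact Or.inr ⟨x, Or.inl rfl, h⟩
        · exact Or.inl h
      · obtain ⟨t, ht, hle⟩ := h; exact Or.inr ⟨t, Or.inr ht, hle⟩
    · rintro (h | ⟨t, (rfl | ht), hle⟩)
      · left; split_ifs with hr
        · omega
        · exact h
      · left; split_ifs with hr
        · exact hle
        · omega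
      · exact Or.inr ⟨t, ht, hle⟩

theorem pvRk_le (n : String) (k : Nat) (hk : k ≤ 5) :
    pvRk n ≤ k ↔
      (k ≥ 0 ∧ n = "reconnaissance") ∨ (k ≥ 1 ∧ n = "initial-access") ∨
      (k ≥ 2 ∧ n = "execution") ∨
      (k ≥ 3 ∧ (n = "persistence" ∨ n = "privilege-escalation")) ∨
      (k ≥ 4 ∧ n = "command-and-control") ∨
      (k ≥ 5 ∧ (n = "exfiltration" ∨ n = "impact")) := by
  simp only [pvRk, pvRankDict, PySem.Dict.ofList, PySem.Dict.update, List.foldl,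
    PySem.Dict.getD_insert, PySem.Dict.getD_empty]
  split_ifs <;> simp_all <;> omega

-- ===== VERDICT =====
theorem get_kill_chain_phase_from_names_py_spec : Claim_equal_get_kill_chain_phase_from_names_py := by
  intro tactics _
  unfold Spec_get_kill_chain_phase_from_names_py
  unfold get_kill_chain_phase_from_names_py get_kill_chain_phase_from_names_py_alt
  simp only [pvContains_fold]
  set names := tactics.map pvNorm with hnames
  set best := tactics.foldl (fun best t =>
      let r := PySem.Dict.getD pvRankDict (pvNorm t) 6
      if r < best then r else best) 6 with hbest
  have hfold : ∀ k : Nat, (best ≤ k) ↔ 6 ≤ k ∨ ∃ n ∈ names, pvRk n ≤ k := by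
    intro k
    rw [hbest, show (fun best t =>
          let r := PySem.Dict.getD pvRankDict (pvNorm t) 6
          if r < best then r else best)
        = (fun best t => let r := pvRk (pvNorm t); if r < best then r else best) from rfl,
      pvFoldl_min_le]
    simp [hnames]
  have hub : ∀ (x : String) (k : Nat), x ∈ names → pvRk x ≤ k → best ≤ k :=
    fun x k hx h => (hfold k).2 (Or.inr ⟨x, hx, h⟩)
  have hlb : ∀ k : Nat, k ≤ 5 → (∀ n ∈ names, ¬ pvRk n ≤ k) → ¬ best ≤ k := by
    intro k hk h
    rw [hfold]
    rintro (h6 | ⟨n, hn, hr⟩)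
    · omega
    · exact h n hn hr
  by_cases h0 : "reconnaissance" ∈ names
  · have hb : best = 0 := by
      have := hub _ 0 h0 (by rw [pvRk_le _ 0 (by omega)]; simp)
      omega
    simp [h0, hb, pvPhases]
  by_cases h1 : "initial-access" ∈ names
  · have hb1 : best ≤ 1 := hub _ 1 h1 (by rw [pvRk_le _ 1 (by omega)]; simp)
    have hb0 : ¬ best ≤ 0 := by
      refine hlb 0 (by omega) ?_
      intro n hn hr
      rw [pvRk_le _ 0 (by omega)] at hr
      rcases hr with ⟨_, rfl⟩ | ⟨hh, _⟩ | ⟨hh, _⟩ | ⟨hh, _⟩ | ⟨hh, _⟩ | ⟨hh, _⟩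
      · exact h0 hn
      all_goals omega
    have hb : best = 1 := by omega
    simp [h0, h1, hb, pvPhases]
  by_cases h2 : "execution" ∈ names
  · have hb1 : best ≤ 2 := hub _ 2 h2 (by rw [pvRk_le _ 2 (by omega)]; simp)
    have hb0 : ¬ best ≤ 1 := by
      refine hlb 1 (by omega) ?_
      intro n hn hr
      rw [pvRk_le _ 1 (by omega)] at hr
      rcases hr with ⟨_, rfl⟩ | ⟨_, rfl⟩ | ⟨hh, _⟩ | ⟨hh, _⟩ | ⟨hh, _⟩ | ⟨hh, _⟩
      · exact h0 hn
      · exact h1 hn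
      all_goals omega
    have hb : best = 2 := by omega
    simp [h0, h1, h2, hb, pvPhases]
  by_cases h3 : "persistence" ∈ names ∨ "privilege-escalation" ∈ names
  · have hb1 : best ≤ 3 := by
      rcases h3 with h | h
      · exact hub _ 3 h (by rw [pvRk_le _ 3 (by omega)]; simp)
      · exact hub _ 3 h (by rw [pvRk_le _ 3 (by omega)]; simp)
    have hb0 : ¬ best ≤ 2 := by
      refine hlb 2 (by omega) ?_
      intro n hn hr
      rw [pvRk_le _ 2 (by omega)] at hr
      rcases hr with ⟨_, rfl⟩ | ⟨_, rfl⟩ | ⟨_, rfl⟩ | ⟨hh, _⟩ | ⟨hh, _⟩ | ⟨hh, _⟩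
      · exact h0 hn
      · exact h1 hn
      · exact h2 hn
      all_goals omega
    have hb : best = 3 := by omega
    simp [h0, h1, h2, h3, hb, pvPhases]
  have h3a : "persistence" ∉ names := fun h => h3 (Or.inl h)
  have h3b : "privilege-escalation" ∉ names := fun h => h3 (Or.inr h)
  by_cases h4 : "command-and-control" ∈ names
  · have hb1 : best ≤ 4 := hub _ 4 h4 (by rw [pvRk_le _ 4 (by omega)]; simp)
    have hb0 : ¬ best ≤ 3 := by
      refine hlb 3 (by omega) ?_
      intro n hn hr
      rw [pvRk_le _ 3 (by omega)] at hr
      rcases hr with ⟨_, rfl⟩ | ⟨_, rfl⟩ | ⟨_, rfl⟩ | ⟨_, (rfl | rfl)⟩ | ⟨hh, _⟩ | ⟨hh, _⟩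
      · exact h0 hn
      · exact h1 hn
      · exact h2 hn
      · exact h3a hn
      · exact h3b hn
      all_goals omega
    have hb : best = 4 := by omega
    simp [h0, h1, h2, h3, h4, hb, pvPhases]
  by_cases h5 : "exfiltration" ∈ names ∨ "impact" ∈ names
  · have hb1 : best ≤ 5 := by
      rcases h5 with h | h
      · exact hub _ 5 h (by rw [pvRk_le _ 5 (by omega)]; simp)
      · exact hub _ 5 h (by rw [pvRk_le _ 5 (by omega)]; simp)
    have hb0 : ¬ best ≤ 4 := by
      refine hlb 4 (by omega) ?_
      intro n hn hr
      rw [pvRk_le _ 4 (by omega)] at hr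
      rcases hr with ⟨_, rfl⟩ | ⟨_, rfl⟩ | ⟨_, rfl⟩ | ⟨_, (rfl | rfl)⟩ | ⟨_, rfl⟩ | ⟨hh, _⟩
      · exact h0 hn
      · exact h1 hn
      · exact h2 hn
      · exact h3a hn
      · exact h3b hn
      · exact h4 hn
      · omega
    have hb : best = 5 := by omega
    simp [h0, h1, h2, h3, h4, h5, hb, pvPhases]
  · have h5a : "exfiltration" ∉ names := fun h => h5 (Or.inl h)
    have h5b : "impact" ∉ names := fun h => h5 (Or.inr h)
    have hb0 : ¬ best ≤ 5 := by
      refine hlb 5 (by omega) ?_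
      intro n hn hr
      rw [pvRk_le _ 5 (by omega)] at hr
      rcases hr with ⟨_, rfl⟩ | ⟨_, rfl⟩ | ⟨_, rfl⟩ | ⟨_, (rfl | rfl)⟩ | ⟨_, rfl⟩ | ⟨_, (rfl | rfl)⟩
      · exact h0 hn
      · exact h1 hn
      · exact h2 hn
      · exact h3a hn
      · exact h3b hn
      · exact h4 hn
      · exact h5a hn
      · exact h5b hn
    simp [h0, h1, h2, h3, h4, h5, show ¬ best < 6 from fun h => hb0 (by omega)]
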